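-- pv_equiv track=rewrite | github.com/manvithachingtha/-Implement-a-digital-signal-generator2 | B8Z8.py | b8zs_scramble
-- ===== SOURCE A (Python) =====
-- def b8zs_scramble(bits):
--     signal = []
--     last = 1
--     i = 0
--     while i < len(bits):
--         if bits[i:i+8] == [0]*8:
--             signal += [0, 0, 0, last, -last, 0, -last, last]
--             i += 8
--         else:
--             if bits[i] == 1:
--                 signal.append(last)
--                 last *= -1
--             else:
--                 signal.append(0)
--             i += 1
--     return signal
-- ===== SOURCE B (Python) =====
-- def b8zs_scramble(bits):
--     out = []
--     zeros = 0
--     last = 1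
--     for b in bits:
--         if b == 0:
--             zeros += 1
--             if zeros == 8:
--                 out += [0, 0, 0, last, -last, 0, -last, last]
--                 zeros = 0
--         else:
--             out += [0] * zeros
--             zeros = 0
--             if b == 1:
--                 out.append(last)
--                 last = -last
--             else:
--                 out.append(0)
--     out += [0] * zeros
--     return out
-- ===== Notes on version B (the rewrite author's own statement) =====
-- stated objective: faster
-- what changed: Replaces A's index loop that builds and compares an 8-wide slice against eight zeros at every position by a single streaming pass keeping a run-length counter of pending zeros (flushed on a nonzero bit or at the end) that substitutes when the counter reaches 8.
import Mathlib
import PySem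

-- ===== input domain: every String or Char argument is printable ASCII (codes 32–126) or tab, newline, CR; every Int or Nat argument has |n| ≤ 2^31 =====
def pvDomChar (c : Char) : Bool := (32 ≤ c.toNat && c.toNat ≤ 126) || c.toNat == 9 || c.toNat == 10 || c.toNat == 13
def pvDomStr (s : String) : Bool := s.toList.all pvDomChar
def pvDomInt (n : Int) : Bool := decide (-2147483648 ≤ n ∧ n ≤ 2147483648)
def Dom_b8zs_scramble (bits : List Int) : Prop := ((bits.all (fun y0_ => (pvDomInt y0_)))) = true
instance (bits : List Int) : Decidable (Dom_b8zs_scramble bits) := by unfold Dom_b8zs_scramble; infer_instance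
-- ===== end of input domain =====

-- B replaces A's per-position 8-wide slice build-and-compare by a single streaming pass with a
-- run-length counter of pending zeros (objective: faster by a constant factor, as measured).

-- ===== PORT A =====
-- literal port of A's while-loop: index i, slice test bits[i:i+8] == [0]*8, element test bits[i] == 1
def b8zs_scramble_loop (bits signal : List Int) (last : Int) (i : Nat) : List Int :=
  if h : i < bits.length then
    if PySem.List.slice bits (some (i : Int)) (some ((i : Int) + 8)) = List.replicate 8 (0 : Int) then
      b8zs_scramble_loop bits (signal ++ [0, 0, 0, last, -last, 0, -last, last]) last (i + 8)
    else
      if PySem.List.pyGetD bits (i : Int) 0 = 1 then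
        b8zs_scramble_loop bits (signal ++ [last]) (last * (-1)) (i + 1)
      else
        b8zs_scramble_loop bits (signal ++ [0]) last (i + 1)
  else signal
termination_by bits.length - i
decreasing_by all_goals omega

def b8zs_scramble (bits : List Int) : List Int :=
  b8zs_scramble_loop bits [] 1 0

-- ===== PORT B =====
-- one fold step of B's for-loop; state = (signal, pending zeros, last)
def b8zs_scramble_alt_step (st : List Int × Nat × Int) (b : Int) : List Int × Nat × Int :=
  match st with
  | (signal, zeros, last) =>
    if b = 0 then
      if zeros + 1 = 8 then (signal ++ [0, 0, 0, last, -last, 0, -last, last], 0, last)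
      else (signal, zeros + 1, last)
    else
      if b = 1 then (signal ++ List.replicate zeros 0 ++ [last], 0, -last)
      else (signal ++ List.replicate zeros 0 ++ [0], 0, last)

def b8zs_scramble_alt (bits : List Int) : List Int :=
  let st := bits.foldl b8zs_scramble_alt_step ([], 0, 1)
  st.1 ++ List.replicate st.2.1 0

-- ===== PRECONDITION & SPEC =====
def Spec_b8zs_scramble (bits : List Int) (out : List Int) : Prop := out = b8zs_scramble_alt bits
instance (bits : List Int) (out : List Int) : Decidable (Spec_b8zs_scramble bits out) := by unfold Spec_b8zs_scramble; infer_instance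

-- ===== CLAIM (what is proved, stated in full; the proofs are below) =====
def Claim_equal_b8zs_scramble : Prop := ∀ (bits : List Int), Dom_b8zs_scramble bits → Spec_b8zs_scramble bits (b8zs_scramble bits)

-- ===== LEMMAS AND PROOFS =====

def pvSub8 (last : Int) : List Int := [0, 0, 0, last, -last, 0, -last, last]

-- A's loop, re-expressed as recursion on the suffix of the input
def pvALoop (l : List Int) (last : Int) : List Int :=
  if h : l.take 8 = List.replicate 8 (0 : Int) then
    pvSub8 last ++ pvALoop (l.drop 8) last
  else
    match l with
    | [] => []
    | b :: t => if b = 1 then last :: pvALoop t (-last) else 0 :: pvALoop t last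
termination_by l.length
decreasing_by
  · have hl : 8 ≤ l.length := by
      have := congrArg List.length h
      simp at this; omega
    simp; omega
  · simp
  · simp

-- B's loop, re-expressed with the pending-zeros counter as an explicit argument
def pvBLoop : List Int → Nat → Int → List Int
  | [], z, _ => List.replicate z 0
  | b :: t, z, last =>
    if b = 0 then
      if z + 1 = 8 then pvSub8 last ++ pvBLoop t 0 last else pvBLoop t (z + 1) last
    else
      List.replicate z 0 ++ (if b = 1 then last :: pvBLoop t 0 (-last) else 0 :: pvBLoop t 0 last)

theorem pv_take_rep_mono {l : List Int} {m n : Nat} (hmn : m ≤ n)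
    (h : l.take n = List.replicate n (0 : Int)) : l.take m = List.replicate m (0 : Int) := by
  have : l.take m = (l.take n).take m := by
    rw [List.take_take, Nat.min_eq_left hmn]
  rw [this, h, List.take_replicate, Nat.min_eq_left hmn]

-- pending zeros can be flushed as long as no substitution will trigger before the run ends
theorem pvBLoop_flush (l : List Int) : ∀ (z : Nat) (last : Int), z < 8 →
    ¬ (l.take (8 - z) = List.replicate (8 - z) (0 : Int)) →
    pvBLoop l z last = List.replicate z 0 ++ pvBLoop l 0 last := by
  induction l with
  | nil =>
    intro z last _ _
    simp [pvBLoop]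
  | cons b t ih =>
    intro z last hz hni
    by_cases hb : b = 0
    · subst hb
      have h7 : ¬ (t.take (7 - z) = List.replicate (7 - z) (0 : Int)) := by
        intro ht
        apply hni
        have h8 : 8 - z = (7 - z) + 1 := by omega
        rw [h8]
        simp [List.replicate_succ, ht]
      have hz7 : z ≠ 7 := by
        intro hz7
        apply h7
        simp [hz7]
      have hz8 : z + 1 ≠ 8 := by omega
      have h7' : ¬ (t.take 7 = List.replicate 7 (0 : Int)) := fun h =>
        h7 (pv_take_rep_mono (by omega) h)
      show pvBLoop (0 :: t) z last = List.replicate z 0 ++ pvBLoop (0 :: t) 0 last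
      simp only [pvBLoop, if_neg hz8]
      have h18 : (1 : Nat) ≠ 8 := by omega
      simp only [Nat.zero_add, if_neg h18]
      rw [ih (z + 1) last (by omega) (by rwa [show 8 - (z + 1) = 7 - z by omega]),
          ih 1 last (by omega) (by simpa using h7')]
      simp [List.replicate_succ']
    · show pvBLoop (b :: t) z last = List.replicate z 0 ++ pvBLoop (b :: t) 0 last
      simp [pvBLoop, if_neg hb]

-- eight consecutive zeros produce exactly one substitution block
theorem pvBLoop_sub (k : Nat) : ∀ (z : Nat) (l : List Int) (last : Int), 1 ≤ k → z + k = 8 →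
    pvBLoop (List.replicate k 0 ++ l) z last = pvSub8 last ++ pvBLoop l 0 last := by
  induction k with
  | zero => intro z l last h1; omega
  | succ k ih =>
    intro z l last _ hzk
    by_cases hk : k = 0
    · subst hk
      have hz : z = 7 := by omega
      subst hz
      simp [pvBLoop]
    · have hz8 : z + 1 ≠ 8 := by omega
      show pvBLoop (0 :: (List.replicate k 0 ++ l)) z last = pvSub8 last ++ pvBLoop l 0 last
      simp only [pvBLoop, if_neg hz8]
      exact ih (z + 1) l last (by omega) (by omega)

theorem pvALoop_eq_pvBLoop (l : List Int) (last : Int) : pvALoop l last = pvBLoop l 0 last := by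
  fun_induction pvALoop l last with
  | case1 l last h ih =>
    have hsplit : l = List.replicate 8 (0 : Int) ++ l.drop 8 := by
      rw [← h]
      exact (List.take_append_drop 8 l).symm
    rw [ih]
    conv_rhs => rw [hsplit]
    rw [pvBLoop_sub 8 0 (l.drop 8) last (by omega) (by omega)]
  | case2 last h =>
    simp [pvBLoop]
  | case3 last t h ih =>
    simp [pvBLoop, ih]
  | case4 last b t h hb ih =>
    by_cases hb0 : b = 0
    · subst hb0
      have h7 : ¬ (t.take 7 = List.replicate 7 (0 : Int)) := by
        intro ht
        apply h
        simp [List.replicate_succ, ht]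
      have hstep : pvBLoop (0 :: t) 0 last = pvBLoop t 1 last := by
        simp [pvBLoop]
      rw [hstep, pvBLoop_flush t 1 last (by omega) (by simpa using h7), ← ih]
      simp
    · simp [pvBLoop, hb0, hb, ih]

-- bridge: A's indexed loop accumulates signal ++ pvALoop of the suffix
theorem pv_slice_take (bits : List Int) (i : Nat) :
    PySem.List.slice bits (some (i : Int)) (some ((i : Int) + 8)) = (bits.drop i).take 8 := by
  have := PySem.List.slice_natCast_add (xs := bits) (j := i) (n := 8)
  simpa using this

theorem pv_loop_eq_pvALoop (bits : List Int) : ∀ (signal : List Int) (last : Int) (i : Nat),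
    b8zs_scramble_loop bits signal last i = signal ++ pvALoop (bits.drop i) last := by
  intro signal last i
  fun_induction b8zs_scramble_loop bits signal last i with
  | case1 signal last i hi hsl ih =>
    rw [pv_slice_take] at hsl
    rw [ih]
    conv_rhs => rw [pvALoop]
    rw [dif_pos hsl]
    simp [pvSub8, List.drop_drop]
  | case2 signal last i hi hsl hb ih =>
    rw [pv_slice_take] at hsl
    have hget : PySem.List.pyGetD bits (i : Int) 0 = bits[i] := by
      rw [PySem.List.pyGetD_natCast]
      exact List.getD_eq_getElem bits 0 hi
    rw [hget] at hb
    have hdrop : bits.drop i = bits[i] :: bits.drop (i + 1) :=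
      List.drop_eq_getElem_cons hi
    rw [ih]
    conv_rhs => rw [hdrop, pvALoop]
    rw [dif_neg (by rwa [← hdrop])]
    simp [hb]
  | case3 signal last i hi hsl hb ih =>
    rw [pv_slice_take] at hsl
    have hget : PySem.List.pyGetD bits (i : Int) 0 = bits[i] := by
      rw [PySem.List.pyGetD_natCast]
      exact List.getD_eq_getElem bits 0 hi
    rw [hget] at hb
    have hdrop : bits.drop i = bits[i] :: bits.drop (i + 1) :=
      List.drop_eq_getElem_cons hi
    rw [ih]
    conv_rhs => rw [hdrop, pvALoop]
    rw [dif_neg (by rwa [← hdrop])]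
    simp [hb]
  | case4 signal last i hi =>
    have hnil : bits.drop i = ([] : List Int) := List.drop_eq_nil_of_le (by omega)
    have hA : pvALoop ([] : List Int) last = [] := by
      simp [pvALoop]
    rw [hnil, hA]
    simp

-- step lemmas for B's fold
theorem pv_step_zero_hit (signal : List Int) (z : Nat) (last : Int) (h : z + 1 = 8) :
    b8zs_scramble_alt_step (signal, z, last) 0
      = (signal ++ [0, 0, 0, last, -last, 0, -last, last], 0, last) := by
  simp [b8zs_scramble_alt_step, h]

theorem pv_step_zero_miss (signal : List Int) (z : Nat) (last : Int) (h : ¬ z + 1 = 8) :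
    b8zs_scramble_alt_step (signal, z, last) 0 = (signal, z + 1, last) := by
  simp [b8zs_scramble_alt_step, h]

theorem pv_step_one (signal : List Int) (z : Nat) (last : Int) :
    b8zs_scramble_alt_step (signal, z, last) 1
      = (signal ++ List.replicate z 0 ++ [last], 0, -last) := by
  simp [b8zs_scramble_alt_step]

theorem pv_step_other (signal : List Int) (z : Nat) (last b : Int) (hb0 : ¬ b = 0) (hb1 : ¬ b = 1) :
    b8zs_scramble_alt_step (signal, z, last) b
      = (signal ++ List.replicate z 0 ++ [0], 0, last) := by
  simp [b8zs_scramble_alt_step, hb0, hb1]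

-- bridge: B's fold, with pending zeros flushed at the end, is pvBLoop
theorem pv_fold_eq_pvBLoop (l : List Int) : ∀ (signal : List Int) (z : Nat) (last : Int), z < 8 →
    (List.foldl b8zs_scramble_alt_step (signal, z, last) l).1
      ++ List.replicate (List.foldl b8zs_scramble_alt_step (signal, z, last) l).2.1 0
    = signal ++ pvBLoop l z last := by
  induction l with
  | nil => intro signal z last _; simp [pvBLoop]
  | cons b t ih =>
    intro signal z last hz
    by_cases hb : b = 0
    · subst hb
      by_cases hz8 : z + 1 = 8
      · rw [List.foldl_cons, pv_step_zero_hit signal z last hz8, ih _ 0 last (by omega)]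
        simp [pvBLoop, hz8, pvSub8]
      · rw [List.foldl_cons, pv_step_zero_miss signal z last hz8, ih _ (z + 1) last (by omega)]
        simp [pvBLoop, hz8]
    · by_cases hb1 : b = 1
      · subst hb1
        rw [List.foldl_cons, pv_step_one signal z last, ih _ 0 (-last) (by omega)]
        simp [pvBLoop]
      · rw [List.foldl_cons, pv_step_other signal z last b hb hb1, ih _ 0 last (by omega)]
        simp [pvBLoop, hb, hb1]

-- ===== VERDICT (by name: the statement is the Claim_ definition above) =====
theorem b8zs_scramble_spec : Claim_equal_b8zs_scramble := by
  intro bits _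
  show b8zs_scramble bits = b8zs_scramble_alt bits
  have hA : b8zs_scramble bits = pvALoop bits 1 := by
    unfold b8zs_scramble
    rw [pv_loop_eq_pvALoop bits [] 1 0]
    simp
  have hB : b8zs_scramble_alt bits = pvBLoop bits 0 1 := by
    unfold b8zs_scramble_alt
    have := pv_fold_eq_pvBLoop bits [] 0 1 (by omega)
    simpa using this
  rw [hA, hB, pvALoop_eq_pvBLoop]
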